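-- pv_equiv track=rewrite | github.com/scirelli/adventofcode.com | 2016/day/14/solution_part2.py | firstFiveInARow
-- ===== SOURCE A (Python) =====
-- def firstFiveInARow(hash, c):
-- 	str = hash.lower()
-- 	i = 0
-- 	l = len(str) - 4
--
-- 	while i < l:
-- 		c1 = str[i:i+1]
-- 		c2 = str[i+1:i+2]
-- 		c3 = str[i+2:i+3]
-- 		c4 = str[i+3:i+4]
-- 		c5 = str[i+4:i+5]
-- 		if(c1 == c and c1 == c2 and c2 == c3 and c3 == c4 and c4 == c5):
-- 			return True
-- 		i += 1
--
-- 	return False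
-- ===== SOURCE B (Python) =====
-- def firstFiveInARow(hash, c):
--     run = 0
--     for ch in hash.lower():
--         if ch == c:
--             run += 1
--             if run == 5:
--                 return True
--         else:
--             run = 0
--     return False
-- ===== Notes on version B (the rewrite author's own statement) =====
-- stated objective: faster
-- what changed: Replaced the sliding-window scan that allocates five one-character slices per position with a single pass maintaining a run counter of consecutive characters equal to c.
import Mathlib
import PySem

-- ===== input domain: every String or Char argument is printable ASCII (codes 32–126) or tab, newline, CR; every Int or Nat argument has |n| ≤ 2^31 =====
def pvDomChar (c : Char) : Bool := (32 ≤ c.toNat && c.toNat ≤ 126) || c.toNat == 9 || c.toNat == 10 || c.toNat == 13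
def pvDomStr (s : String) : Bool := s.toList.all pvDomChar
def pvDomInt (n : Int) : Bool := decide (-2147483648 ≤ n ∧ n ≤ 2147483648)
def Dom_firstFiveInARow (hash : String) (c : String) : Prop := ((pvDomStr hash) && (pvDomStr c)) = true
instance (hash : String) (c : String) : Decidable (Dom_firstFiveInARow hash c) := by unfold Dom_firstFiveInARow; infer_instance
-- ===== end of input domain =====

-- B replaces the window-of-five slice scan by a single pass with a run counter (idiomatic; return value only).

-- ===== PORT A =====
-- the five one-character slices str[i:i+1] … str[i+4:i+5] and their chained comparisons
def pvWin (c : String) (x1 x2 x3 x4 x5 : Char) : Bool :=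
  (String.ofList [x1] == c) && (String.ofList [x1] == String.ofList [x2]) &&
  (String.ofList [x2] == String.ofList [x3]) && (String.ofList [x3] == String.ofList [x4]) &&
  (String.ofList [x4] == String.ofList [x5])

-- the while loop: i advances while i < len - 4, i.e. while the suffix has ≥ 5 chars
def pvAGo (c : String) : List Char → Bool
  | x1 :: x2 :: x3 :: x4 :: x5 :: rest =>
    if pvWin c x1 x2 x3 x4 x5 then true else pvAGo c (x2 :: x3 :: x4 :: x5 :: rest)
  | _ => false

def firstFiveInARow (hash : String) (c : String) : Bool :=
  pvAGo c (PySem.Str.lower hash).toList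

-- ===== PORT B =====
def pvBGo (c : String) (run : Nat) : List Char → Bool
  | [] => false
  | x :: xs =>
    if String.ofList [x] == c then
      if run + 1 == 5 then true else pvBGo c (run + 1) xs
    else pvBGo c 0 xs

def firstFiveInARow_alt (hash : String) (c : String) : Bool :=
  pvBGo c 0 (PySem.Str.lower hash).toList

-- ===== PRECONDITION & SPEC =====
def Spec_firstFiveInARow (hash : String) (c : String) (out : Bool) : Prop := out = firstFiveInARow_alt hash c
instance (hash : String) (c : String) (out : Bool) : Decidable (Spec_firstFiveInARow hash c out) := by unfold Spec_firstFiveInARow; infer_instance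

-- ===== CLAIM (what is proved, stated in full; the proofs are below) =====
def Claim_equal_firstFiveInARow : Prop := ∀ (hash : String) (c : String), Dom_firstFiveInARow hash c → Spec_firstFiveInARow hash c (firstFiveInARow hash c)

-- ===== LEMMAS AND PROOFS =====

theorem pvOfList_single_inj (a b : Char) : String.ofList [a] = String.ofList [b] ↔ a = b := by
  constructor
  · intro h; have := congrArg String.toList h; simpa using this
  · intro h; rw [h]

theorem pvWin_true_iff (c : String) (x1 x2 x3 x4 x5 : Char) :
    pvWin c x1 x2 x3 x4 x5 = true ↔ String.ofList [x1] = c ∧ x1 = x2 ∧ x2 = x3 ∧ x3 = x4 ∧ x4 = x5 := by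
  simp [pvWin, pvOfList_single_inj, and_assoc]

theorem pvAGo_short (c : String) (s : List Char) (h : s.length < 5) : pvAGo c s = false := by
  match s, h with
  | [], _ => rfl
  | [_], _ => rfl
  | [_, _], _ => rfl
  | [_, _, _], _ => rfl
  | [_, _, _, _], _ => rfl

theorem pvAGo_never (c : String) (hc : ∀ x : Char, (String.ofList [x] == c) = false)
    (s : List Char) : pvAGo c s = false := by
  induction s with
  | nil => rfl
  | cons x xs ih =>
    match xs, ih with
    | x2 :: x3 :: x4 :: x5 :: rest, ih =>
      simp only [pvAGo, pvWin, hc x, Bool.false_and]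
      exact ih
    | [], _ | [_], _ | [_, _], _ | [_, _, _], _ => rfl

theorem pvBGo_never (c : String) (hc : ∀ x : Char, (String.ofList [x] == c) = false)
    (s : List Char) : ∀ run, pvBGo c run s = false := by
  induction s with
  | nil => intro _; rfl
  | cons x xs ih => intro run; simp only [pvBGo, hc x]; simpa using ih 0

theorem pvAGo_cons_not (c : String) (x : Char) (hx : (String.ofList [x] == c) = false)
    (s : List Char) : pvAGo c (x :: s) = pvAGo c s := by
  match s with
  | x2 :: x3 :: x4 :: x5 :: rest =>
    simp only [pvAGo, pvWin, hx, Bool.false_and]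
    simp
  | [] | [_] | [_, _] | [_, _, _] =>
    rw [pvAGo_short c _ (by simp), pvAGo_short c _ (by simp)]

theorem pvAGo_skip (c : String) (ch x : Char) (hch : String.ofList [ch] = c)
    (hx : (String.ofList [x] == c) = false) :
    ∀ r : Nat, r ≤ 4 → ∀ xs : List Char,
      pvAGo c (List.replicate r ch ++ x :: xs) = pvAGo c xs := by
  intro r
  induction r with
  | zero => intro _ xs; simpa using pvAGo_cons_not c x hx xs
  | succ r ih =>
    intro hr xs
    have hr3 : r ≤ 3 := by omega
    clear hr
    have step : pvAGo c (List.replicate (r + 1) ch ++ x :: xs)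
        = pvAGo c (List.replicate r ch ++ x :: xs) := by
      interval_cases r
      · -- list = ch :: x :: xs
        match xs with
        | x3 :: x4 :: x5 :: rest =>
          simp only [List.replicate, List.nil_append, List.cons_append, pvAGo]
          have : pvWin c ch x x3 x4 x5 = false := by
            by_contra h
            rcases (pvWin_true_iff c ch x x3 x4 x5).1 (by revert h; cases pvWin c ch x x3 x4 x5 <;> simp) with ⟨h1, h2, _⟩
            subst h2; simp [hch] at hx
          simp [this]
        | [] | [_] | [_, _] =>
          rw [pvAGo_short c _ (by simp), pvAGo_short c _ (by simp)]
      · -- list = ch :: ch :: x :: xs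
        match xs with
        | x4 :: x5 :: rest =>
          simp only [List.replicate, List.nil_append, List.cons_append, pvAGo]
          have : pvWin c ch ch x x4 x5 = false := by
            by_contra h
            rcases (pvWin_true_iff c ch ch x x4 x5).1 (by revert h; cases pvWin c ch ch x x4 x5 <;> simp) with ⟨h1, _, h3, _⟩
            subst h3; simp [hch] at hx
          simp [this]
        | [] | [_] =>
          rw [pvAGo_short c _ (by simp), pvAGo_short c _ (by simp)]
      · -- list = ch :: ch :: ch :: x :: xs
        match xs with
        | x5 :: rest =>
          simp only [List.replicate, List.nil_append, List.cons_append, pvAGo]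
          have : pvWin c ch ch ch x x5 = false := by
            by_contra h
            rcases (pvWin_true_iff c ch ch ch x x5).1 (by revert h; cases pvWin c ch ch ch x x5 <;> simp) with ⟨h1, _, _, h4, _⟩
            subst h4; simp [hch] at hx
          simp [this]
        | [] =>
          rw [pvAGo_short c _ (by simp), pvAGo_short c _ (by simp)]
      · -- list = ch :: ch :: ch :: ch :: x :: xs
        simp only [List.replicate, List.nil_append, List.cons_append, pvAGo]
        have : pvWin c ch ch ch ch x = false := by
          by_contra h
          rcases (pvWin_true_iff c ch ch ch ch x).1 (by revert h; cases pvWin c ch ch ch ch x <;> simp) with ⟨h1, _, _, _, h5⟩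
          subst h5; simp [hch] at hx
        simp [this]
    rw [step, ih (by omega) xs]

theorem pvBGo_eq_pvAGo (c : String) (ch : Char) (hch : String.ofList [ch] = c) :
    ∀ (s : List Char) (run : Nat), run ≤ 4 →
      pvBGo c run s = pvAGo c (List.replicate run ch ++ s) := by
  intro s
  induction s with
  | nil =>
    intro run hrun
    rw [pvBGo, List.append_nil, pvAGo_short c _ (by simp; omega)]
  | cons x xs ih =>
    intro run hrun
    by_cases hx : (String.ofList [x] == c) = true
    · have hxch : x = ch := by
        exact (pvOfList_single_inj x ch).1 (by rw [hch]; exact eq_of_beq hx)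
      subst hxch
      by_cases h5 : run + 1 = 5
      · have hrun4 : run = 4 := by omega
        subst hrun4
        simp only [pvBGo, hx, if_true, h5]
        simp only [List.replicate, List.nil_append, List.cons_append, pvAGo]
        have : pvWin c x x x x x = true := (pvWin_true_iff c x x x x x).2 ⟨hch, rfl, rfl, rfl, rfl⟩
        simp [this]
      · have hrun' : run + 1 ≤ 4 := by omega
        have : List.replicate run x ++ x :: xs = List.replicate (run + 1) x ++ xs := by
          simp [List.replicate_succ']
        rw [pvBGo, if_pos hx, if_neg (by simpa using h5), this, ih (run + 1) hrun']
    · have hx' : (String.ofList [x] == c) = false := by simpa using hx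
      rw [pvBGo, if_neg (by simp [hx']), ih 0 (by omega),
        pvAGo_skip c ch x hch hx' run hrun xs]
      rfl

theorem main_eq (c : String) (s : List Char) : pvAGo c s = pvBGo c 0 s := by
  by_cases h : ∃ ch : Char, String.ofList [ch] = c
  · rcases h with ⟨ch, hch⟩
    rw [pvBGo_eq_pvAGo c ch hch s 0 (by omega)]
    rfl
  · push Not at h
    have hc : ∀ x : Char, (String.ofList [x] == c) = false := by
      intro x; simpa using h x
    rw [pvAGo_never c hc s, pvBGo_never c hc s 0]

-- ===== VERDICT (by name: the statement is the Claim_ definition above) =====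
theorem firstFiveInARow_spec : Claim_equal_firstFiveInARow := by
  intro hash c _
  unfold Spec_firstFiveInARow firstFiveInARow firstFiveInARow_alt
  exact main_eq c (PySem.Str.lower hash).toList
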